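-- pv_equiv track=rewrite | github.com/igapon50/training | python/Movie/mltHelper.py | get_next_index_entry
-- ===== SOURCE A (Python) =====
-- def get_next_index_entry(entry):
--     """
--     リストに無い次の(アルファベット+十進数値な)名前のindex(管理番号)を返す
--
--     :param entry: list 対象の管理リスト
--     :return: str 次のindex(管理番号)
--     """
--     ret_value = 0
--     entry_length = len(entry)
--     for index in range(entry_length):
--         if index not in entry:
--             return index
--         ret_value = index + 1
--     return ret_value
-- ===== SOURCE B (Python) =====
-- def get_next_index_entry(entry):
--     """Return the smallest index in range(len(entry)) not present in entry,
--     or len(entry) if all are present (0 for an empty list)."""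
--     missing = set(range(len(entry))) - set(entry)
--     return min(missing, default=len(entry))
-- ===== Notes on version B (the rewrite author's own statement) =====
-- stated objective: idiomatic
-- what changed: Replaces A's sequential early-exit scan (with an 'index in entry' list membership test inside it) by a set-difference: build set(range(n)) - set(entry) once and reduce with min(default=len(entry)).
import Mathlib
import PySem

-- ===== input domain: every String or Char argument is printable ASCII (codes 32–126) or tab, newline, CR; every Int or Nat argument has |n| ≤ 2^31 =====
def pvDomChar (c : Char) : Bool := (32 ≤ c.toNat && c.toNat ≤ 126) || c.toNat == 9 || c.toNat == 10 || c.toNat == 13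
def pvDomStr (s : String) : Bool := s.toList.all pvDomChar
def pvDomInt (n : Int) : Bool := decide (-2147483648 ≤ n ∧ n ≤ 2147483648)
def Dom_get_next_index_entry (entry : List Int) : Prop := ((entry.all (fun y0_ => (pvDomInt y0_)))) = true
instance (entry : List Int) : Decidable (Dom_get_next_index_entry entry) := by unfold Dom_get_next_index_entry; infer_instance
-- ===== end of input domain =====

-- B replaces A's sequential early-exit scan (with a linear membership test inside it)
-- by a set-difference: set(range(n)) - set(entry), reduced with min(default=len(entry)).

-- ===== PORT A =====
-- the for-loop of A: early return on a missing index, else ret_value := index + 1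
def pvALoop (entry : List Int) : List Int → Int → Int
  | [], ret => ret
  | i :: rest, _ =>
    if !(entry.contains i) then i
    else pvALoop entry rest (i + 1)

def get_next_index_entry (entry : List Int) : Int :=
  pvALoop entry (PySem.List.pyRange 0 (entry.length : Int) 1) 0

-- ===== PORT B =====
def get_next_index_entry_alt (entry : List Int) : Int :=
  let missing := PySem.Set.diff
    (PySem.Set.ofList (PySem.List.pyRange 0 (entry.length : Int) 1))
    (PySem.Set.ofList entry)
  PySem.List.minD missing (fun i => i) (entry.length : Int)

-- ===== PRECONDITION & SPEC =====
def Spec_get_next_index_entry (entry : List Int) (out : Int) : Prop := out = get_next_index_entry_alt entry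
instance (entry : List Int) (out : Int) : Decidable (Spec_get_next_index_entry entry out) := by unfold Spec_get_next_index_entry; infer_instance

-- ===== CLAIM (what is proved, stated in full; the proofs are below) =====
def Claim_equal_get_next_index_entry : Prop := ∀ (entry : List Int), Dom_get_next_index_entry entry → Spec_get_next_index_entry entry (get_next_index_entry entry)

-- ===== LEMMAS AND PROOFS =====

-- A's loop, unravelled: it returns the first filtered-in index, and when none is
-- filtered in it has threaded ret_value = last index + 1 (or the initial acc).
lemma pvALoop_eq (entry : List Int) (xs : List Int) (acc : Int) :
    pvALoop entry xs acc =
      match xs.filter (fun i => !(entry.contains i)) with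
      | i :: _ => i
      | [] => ((xs.getLast?).map (· + 1)).getD acc := by
  induction xs generalizing acc with
  | nil => simp [pvALoop]
  | cons i rest ih =>
    simp only [pvALoop, List.filter_cons]
    by_cases h : entry.contains i
    · rw [if_neg (by simp_all), if_neg (by simp_all), ih]
      cases hf : rest.filter (fun j => !(entry.contains j)) with
      | cons j t => rfl
      | nil =>
        cases rest with
        | nil => rfl
        | cons b bs =>
          rw [List.getLast?_cons_cons]
          cases hz : (b :: bs).getLast? with
          | none => simp [List.getLast?_eq_none_iff] at hz
          | some z => simp
    · rw [if_pos (by simp_all), if_pos (by simp_all)]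

lemma pvRange_eq (n : Nat) :
    PySem.List.pyRange 0 (n : Int) 1 = List.map (fun (k : Nat) => ((k : Int))) (List.range n) :=
  PySem.List.pyRange_zero_natCast n

lemma pvRange_nodup (n : Nat) : (PySem.List.pyRange 0 (n : Int) 1).Nodup := by
  rw [pvRange_eq]
  exact (List.nodup_range).map (fun a b h => by exact_mod_cast h)

lemma pvRange_pairwise (n : Nat) :
    (PySem.List.pyRange 0 (n : Int) 1).Pairwise (· < ·) := by
  rw [pvRange_eq]
  exact List.pairwise_lt_range.map _ (fun a b h => by exact_mod_cast h)

lemma pvRange_getLast (n : Nat) (h : 0 < n) :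
    (PySem.List.pyRange 0 (n : Int) 1).getLast? = some ((n : Int) - 1) := by
  rw [pvRange_eq]
  obtain ⟨m, rfl⟩ := Nat.exists_eq_add_of_lt h
  rw [List.range_succ, List.map_append]
  simp


-- B's 'missing' set is a plain filter of the index range
lemma pvMissing_eq (entry : List Int) :
    PySem.Set.diff
        (PySem.Set.ofList (PySem.List.pyRange 0 (entry.length : Int) 1))
        (PySem.Set.ofList entry)
      = (PySem.List.pyRange 0 (entry.length : Int) 1).filter
          (fun i => !(entry.contains i)) := by
  rw [PySem.Set.ofList_eq_self_of_nodup _ (pvRange_nodup entry.length)]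
  show List.filter _ _ = _
  apply List.filter_congr
  intro i _
  simp [PySem.Set.mem_ofList]

-- min with a default on a strictly increasing list is its head (or the default)
lemma pvMinD_pairwise (xs : List Int) (d : Int) (hp : xs.Pairwise (· < ·)) :
    PySem.List.minD xs (fun i => i) d = xs.headD d := by
  cases xs with
  | nil => rfl
  | cons x t =>
    have : PySem.List.min? (x :: t) (fun i => i) = some x := by
      cases hm : PySem.List.min? (x :: t) (fun i => i) with
      | none => simp [PySem.List.min?_eq_none_iff] at hm
      | some m =>
        have hmem := PySem.List.min?_mem hm
        have hmin := PySem.List.min?_isMin hm x (by simp)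
        rcases List.mem_cons.1 hmem with rfl | hmt
        · rfl
        · have := (List.pairwise_cons.1 hp).1 m hmt
          omega
    show (PySem.List.min? (x :: t) (fun i => i)).getD d = _
    simp [this]

theorem pv_main (entry : List Int) :
    get_next_index_entry entry = get_next_index_entry_alt entry := by
  unfold get_next_index_entry get_next_index_entry_alt
  rw [pvMissing_eq, pvALoop_eq,
    pvMinD_pairwise _ _ ((pvRange_pairwise entry.length).filter _)]
  cases hf : (PySem.List.pyRange 0 (entry.length : Int) 1).filter
      (fun i => !(entry.contains i)) with
  | cons i t => simp
  | nil =>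
    simp only [List.headD_nil]
    cases hn : entry.length with
    | zero => simp [PySem.List.pyRange]
    | succ m =>
      rw [pvRange_getLast (m + 1) (by omega)]
      simp

-- ===== VERDICT (by name: the statement is the Claim_ definition above) =====
theorem get_next_index_entry_spec : Claim_equal_get_next_index_entry := by
  intro entry _
  exact pv_main entry
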